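-- pv_equiv track=rewrite | github.com/HandyWote/ChaoYiXingHuo | scripts/rewrite-descriptions.py | split_array_entries
-- ===== SOURCE A (Python) =====
-- def split_array_entries(array_text: str) -> list[tuple[int, int, str]]:
--     """用 brace-depth 解析拆分数组中的 JSON 对象（字符串感知，正确处理转义）。"""
--     entries = []
--     depth = 0
--     in_string = False
--     start = -1
--     i = 0
--     while i < len(array_text):
--         ch = array_text[i]
--         if in_string:
--             if ch == "\\" and i + 1 < len(array_text):
--                 i += 2  # 跳过转义字符
--                 continue
--             if ch == '"':
--                 in_string = False
--         elif ch == '"':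
--             in_string = True
--         elif ch == "{":
--             if depth == 0:
--                 start = i
--             depth += 1
--         elif ch == "}":
--             depth -= 1
--             if depth == 0 and start >= 0:
--                 entries.append((start, i + 1, array_text[start : i + 1]))
--                 start = -1
--         i += 1
--     return entries
-- ===== SOURCE B (Python) =====
-- def _brace_events(s):
--     # positions of braces outside string literals, as (index, +1/-1) depth deltas
--     events = []
--     i = 0
--     n = len(s)
--     while i < n:
--         c = s[i]
--         if c == '"':
--             i += 1
--             while i < n:  # skip the whole string literal
--                 if s[i] == '"':
--                     i += 1
--                     break
--                 i += 2 if s[i] == "\\" and i + 1 < n else 1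
--         elif c == "{":
--             events.append((i, 1))
--             i += 1
--         elif c == "}":
--             events.append((i, -1))
--             i += 1
--         else:
--             i += 1
--     return events
--
--
-- def split_array_entries(array_text: str) -> list[tuple[int, int, str]]:
--     # collect the 0->1 opening positions and the 1->0 closing positions, then pair them up
--     opens = []
--     closes = []
--     depth = 0
--     for i, delta in _brace_events(array_text):
--         if delta == 1:
--             if depth == 0:
--                 opens.append(i)
--             depth += 1
--         else:
--             depth -= 1
--             if depth == 0:
--                 closes.append(i)
--     return [(s, e + 1, array_text[s : e + 1]) for s, e in zip(opens, closes)]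
-- ===== Notes on version B (the rewrite author's own statement) =====
-- stated objective: alternative
-- what changed: A maintains a start variable and emits each entry on the fly inside one stateful scan; B instead collects the 0->1 opening-brace positions and the 1->0 closing-brace positions (from a string-masked brace-event list) as two separate lists and pairs them positionally with zip in a final comprehension, with no start variable or emit-on-close logic.
import Mathlib
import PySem

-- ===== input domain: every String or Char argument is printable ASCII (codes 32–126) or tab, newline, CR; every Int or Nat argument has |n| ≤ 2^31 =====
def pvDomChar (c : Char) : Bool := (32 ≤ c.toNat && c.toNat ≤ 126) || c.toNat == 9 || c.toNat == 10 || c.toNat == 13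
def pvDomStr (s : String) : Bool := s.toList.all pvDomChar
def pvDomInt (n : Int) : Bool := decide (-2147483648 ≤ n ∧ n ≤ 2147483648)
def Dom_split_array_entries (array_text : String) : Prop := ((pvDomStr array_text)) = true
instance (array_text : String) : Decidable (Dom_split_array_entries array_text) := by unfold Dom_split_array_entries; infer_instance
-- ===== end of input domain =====

-- B drops A's start variable and emit-on-close scan: it collects the 0->1 open positions and
-- the 1->0 close positions as two lists and pairs them positionally with zip.

-- ===== PORT A =====
-- A's while loop, step for step, as structural recursion over the unread suffix; i is the
-- current index in the original text cs0 (so `i + 1 < len` is `rest ≠ []`), the escape case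
-- consumes two characters, slices of the original text via PySem.List.slice.
def aLoop (cs0 : List Char) : List Char → Nat → Int → Bool → Int →
    List (Int × Int × String) → List (Int × Int × String)
  | [], _, _, _, _, entries => entries
  | ch :: rest, i, depth, in_string, start, entries =>
    if in_string then
      if ch = '\\' then
        match rest with
        | _ :: rest' => aLoop cs0 rest' (i + 2) depth in_string start entries
        | [] => entries  -- i+1 = len: Python advances past the lone backslash and the loop ends
      else if ch = '"' then
        aLoop cs0 rest (i + 1) depth false start entries
      else
        aLoop cs0 rest (i + 1) depth in_string start entries
    else if ch = '"' then
      aLoop cs0 rest (i + 1) depth true start entries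
    else if ch = '{' then
      aLoop cs0 rest (i + 1) (depth + 1) in_string (if depth = 0 then (i : Int) else start) entries
    else if ch = '}' then
      if depth - 1 = 0 ∧ start ≥ 0 then
        aLoop cs0 rest (i + 1) (depth - 1) in_string (-1)
          (entries ++ [(start, (i : Int) + 1,
            String.ofList (PySem.List.slice cs0 (some start) (some ((i : Int) + 1))))])
      else
        aLoop cs0 rest (i + 1) (depth - 1) in_string start entries
    else
      aLoop cs0 rest (i + 1) depth in_string start entries

def split_array_entries (array_text : String) : List (Int × Int × String) :=
  aLoop array_text.toList array_text.toList 0 0 false (-1) []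

-- ===== PORT B =====
-- the inner `while` of _brace_events (skip a string literal): entered just after the opening
-- quote; in list form it returns the unread suffix together with the index Python leaves in i.
def bSkip : List Char → Nat → List Char × Nat
  | [], i => ([], i)
  | c :: rest, i =>
    if c = '"' then (rest, i + 1)
    else if c = '\\' then
      match rest with
      | _ :: rest' => bSkip rest' (i + 2)
      | [] => ([], i + 1)  -- i+1 = len: the lone backslash is stepped over and the loop ends
    else bSkip rest (i + 1)

-- _brace_events: (position, ±1) for every brace outside string literals; the fuel argument
-- (called with the text length) only makes the jump over a skipped literal structural.
def bEvents : Nat → List Char → Nat → List (Nat × Int)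
  | 0, _, _ => []
  | _ + 1, [], _ => []
  | fuel + 1, c :: rest, i =>
    if c = '"' then
      bEvents fuel (bSkip rest (i + 1)).1 (bSkip rest (i + 1)).2
    else if c = '{' then
      (i, 1) :: bEvents fuel rest (i + 1)
    else if c = '}' then
      (i, -1) :: bEvents fuel rest (i + 1)
    else
      bEvents fuel rest (i + 1)

-- the for-loop over the events: grow the opens / closes lists (Python appends)
def bPhase2 : List (Nat × Int) → Int → List Nat → List Nat → List Nat × List Nat
  | [], _, opens, closes => (opens, closes)
  | (i, delta) :: evs, depth, opens, closes =>
    if delta = 1 then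
      bPhase2 evs (depth + 1) (if depth = 0 then opens ++ [i] else opens) closes
    else
      bPhase2 evs (depth - 1) opens (if depth - 1 = 0 then closes ++ [i] else closes)

def split_array_entries_alt (array_text : String) : List (Int × Int × String) :=
  ((bPhase2 (bEvents array_text.toList.length array_text.toList 0) 0 [] []).1.zip
      (bPhase2 (bEvents array_text.toList.length array_text.toList 0) 0 [] []).2).map
    (fun p => ((p.1 : Int), (p.2 : Int) + 1,
      String.ofList (PySem.List.slice array_text.toList
        (some (p.1 : Int)) (some ((p.2 : Int) + 1)))))

-- ===== PRECONDITION & SPEC =====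
def Spec_split_array_entries (array_text : String) (out : List (Int × Int × String)) : Prop := out = split_array_entries_alt array_text
instance (array_text : String) (out : List (Int × Int × String)) : Decidable (Spec_split_array_entries array_text out) := by unfold Spec_split_array_entries; infer_instance

-- ===== CLAIM (what is proved, stated in full; the proofs are below) =====
def Claim_equal_split_array_entries : Prop := ∀ (array_text : String), Dom_split_array_entries array_text → Spec_split_array_entries array_text (split_array_entries array_text)

-- ===== LEMMAS AND PROOFS =====

-- proof-only device: A's out-of-string scan re-expressed as a fold over the brace events
def gLoop (cs0 : List Char) : List (Nat × Int) → Int → Int →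
    List (Int × Int × String) → List (Int × Int × String)
  | [], _, _, entries => entries
  | (i, delta) :: evs, depth, start, entries =>
    if delta = 1 then
      gLoop cs0 evs (depth + 1) (if depth = 0 then (i : Int) else start) entries
    else if depth - 1 = 0 ∧ start ≥ 0 then
      gLoop cs0 evs (depth - 1) (-1)
        (entries ++ [(start, (i : Int) + 1,
          String.ofList (PySem.List.slice cs0 (some start) (some ((i : Int) + 1))))])
    else
      gLoop cs0 evs (depth - 1) start entries

-- proof-only device: right-fold characterisation of bPhase2 (opens / closes without accumulators)
def bOC : List (Nat × Int) → Int → List Nat × List Nat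
  | [], _ => ([], [])
  | (i, delta) :: evs, depth =>
    if delta = 1 then
      let oc := bOC evs (depth + 1)
      ((if depth = 0 then i :: oc.1 else oc.1), oc.2)
    else
      let oc := bOC evs (depth - 1)
      (oc.1, (if depth - 1 = 0 then i :: oc.2 else oc.2))

def mkE (cs0 : List Char) (p : Nat × Nat) : Int × Int × String :=
  ((p.1 : Int), (p.2 : Int) + 1,
    String.ofList (PySem.List.slice cs0 (some (p.1 : Int)) (some ((p.2 : Int) + 1))))

theorem gLoop_nil (cs0 : List Char) (d st : Int) (acc : List (Int × Int × String)) :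
    gLoop cs0 [] d st acc = acc := by rw [gLoop.eq_def]
theorem gLoop_open (cs0 : List Char) (i : Nat) (evs : List (Nat × Int)) (d st : Int)
    (acc : List (Int × Int × String)) :
    gLoop cs0 ((i, 1) :: evs) d st acc =
      gLoop cs0 evs (d + 1) (if d = 0 then (i : Int) else st) acc := by
  rw [gLoop.eq_def]; simp
theorem gLoop_close (cs0 : List Char) (i : Nat) (evs : List (Nat × Int)) (d st : Int)
    (acc : List (Int × Int × String)) :
    gLoop cs0 ((i, -1) :: evs) d st acc =
      (if d - 1 = 0 ∧ st ≥ 0 then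
        gLoop cs0 evs (d - 1) (-1)
          (acc ++ [(st, (i : Int) + 1,
            String.ofList (PySem.List.slice cs0 (some st) (some ((i : Int) + 1))))])
      else gLoop cs0 evs (d - 1) st acc) := by
  rw [gLoop.eq_def]; simp

theorem bOC_nil (d : Int) : bOC [] d = ([], []) := by rw [bOC.eq_def]
theorem bOC_open (i : Nat) (evs : List (Nat × Int)) (d : Int) :
    bOC ((i, 1) :: evs) d =
      ((if d = 0 then i :: (bOC evs (d + 1)).1 else (bOC evs (d + 1)).1), (bOC evs (d + 1)).2) := by
  rw [bOC.eq_def]; simp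
theorem bPhase2_nil (d : Int) (opens closes : List Nat) :
    bPhase2 [] d opens closes = (opens, closes) := by rw [bPhase2.eq_def]
theorem bPhase2_open (i : Nat) (evs : List (Nat × Int)) (d : Int) (opens closes : List Nat) :
    bPhase2 ((i, 1) :: evs) d opens closes =
      bPhase2 evs (d + 1) (if d = 0 then opens ++ [i] else opens) closes := by
  rw [bPhase2.eq_def]; simp
-- one-step unfolding lemmas (the autogenerated equations carry Char-literal patterns)
theorem skip_nil (i : Nat) : bSkip [] i = ([], i) := by rw [bSkip.eq_def]
theorem skip_quote (r : List Char) (i : Nat) : bSkip ('"' :: r) i = (r, i + 1) := by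
  rw [bSkip.eq_def]; simp
theorem skip_esc (x : Char) (r : List Char) (i : Nat) :
    bSkip ('\\' :: x :: r) i = bSkip r (i + 2) := by
  rw [bSkip.eq_def]; simp
theorem skip_esc_nil (i : Nat) : bSkip ['\\'] i = ([], i + 1) := by
  rw [bSkip.eq_def]; simp
theorem skip_other (c : Char) (r : List Char) (i : Nat) (h1 : ¬ c = '"') (h2 : ¬ c = '\\') :
    bSkip (c :: r) i = bSkip r (i + 1) := by
  rw [bSkip.eq_def]; simp [h1, h2]

theorem aLoop_nil (cs0 : List Char) (i : Nat) (d : Int) (b : Bool) (st : Int)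
    (acc : List (Int × Int × String)) : aLoop cs0 [] i d b st acc = acc := by
  rw [aLoop.eq_def]
theorem aLoop_true_quote (cs0 r i d st acc) :
    aLoop cs0 ('"' :: r) i d true st acc = aLoop cs0 r (i + 1) d false st acc := by
  rw [aLoop.eq_def]; simp
theorem aLoop_true_esc (cs0 : List Char) (x : Char) (r : List Char) (i : Nat) (d st : Int)
    (acc : List (Int × Int × String)) :
    aLoop cs0 ('\\' :: x :: r) i d true st acc = aLoop cs0 r (i + 2) d true st acc := by
  rw [aLoop.eq_def]; simp
theorem aLoop_true_esc_nil (cs0 : List Char) (i : Nat) (d st : Int)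
    (acc : List (Int × Int × String)) : aLoop cs0 ['\\'] i d true st acc = acc := by
  rw [aLoop.eq_def]; simp
theorem aLoop_true_other (cs0 : List Char) (c : Char) (r : List Char) (i : Nat) (d st : Int)
    (acc : List (Int × Int × String)) (h1 : ¬ c = '"') (h2 : ¬ c = '\\') :
    aLoop cs0 (c :: r) i d true st acc = aLoop cs0 r (i + 1) d true st acc := by
  rw [aLoop.eq_def]; simp [h1, h2]
theorem aLoop_false_quote (cs0 r i d st acc) :
    aLoop cs0 ('"' :: r) i d false st acc = aLoop cs0 r (i + 1) d true st acc := by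
  rw [aLoop.eq_def]; simp
theorem aLoop_false_open (cs0 r i d st acc) :
    aLoop cs0 ('{' :: r) i d false st acc =
      aLoop cs0 r (i + 1) (d + 1) false (if d = 0 then (i : Int) else st) acc := by
  rw [aLoop.eq_def]; simp
theorem aLoop_false_close (cs0 r i d st acc) :
    aLoop cs0 ('}' :: r) i d false st acc =
      (if d - 1 = 0 ∧ st ≥ 0 then
        aLoop cs0 r (i + 1) (d - 1) false (-1)
          (acc ++ [(st, (i : Int) + 1,
            String.ofList (PySem.List.slice cs0 (some st) (some ((i : Int) + 1))))])
      else aLoop cs0 r (i + 1) (d - 1) false st acc) := by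
  rw [aLoop.eq_def]; simp
theorem aLoop_false_other (cs0 : List Char) (c : Char) (r : List Char) (i : Nat) (d st : Int)
    (acc : List (Int × Int × String)) (h1 : ¬ c = '"') (h2 : ¬ c = '{') (h3 : ¬ c = '}') :
    aLoop cs0 (c :: r) i d false st acc = aLoop cs0 r (i + 1) d false st acc := by
  rw [aLoop.eq_def]; simp [h1, h2, h3]

theorem ev_zero (r : List Char) (i : Nat) : bEvents 0 r i = [] := by rw [bEvents.eq_def]
theorem ev_nil (f : Nat) (i : Nat) : bEvents f [] i = [] := by
  rw [bEvents.eq_def]; cases f <;> simp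
theorem ev_quote (f : Nat) (r : List Char) (i : Nat) :
    bEvents (f + 1) ('"' :: r) i = bEvents f (bSkip r (i + 1)).1 (bSkip r (i + 1)).2 := by
  rw [bEvents.eq_def]; simp
theorem ev_open (f : Nat) (r : List Char) (i : Nat) :
    bEvents (f + 1) ('{' :: r) i = (i, 1) :: bEvents f r (i + 1) := by
  rw [bEvents.eq_def]; simp
theorem ev_close (f : Nat) (r : List Char) (i : Nat) :
    bEvents (f + 1) ('}' :: r) i = (i, -1) :: bEvents f r (i + 1) := by
  rw [bEvents.eq_def]; simp
theorem ev_other (f : Nat) (c : Char) (r : List Char) (i : Nat)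
    (h1 : ¬ c = '"') (h2 : ¬ c = '{') (h3 : ¬ c = '}') :
    bEvents (f + 1) (c :: r) i = bEvents f r (i + 1) := by
  rw [bEvents.eq_def]; simp [h1, h2, h3]

-- skipping a string literal never lengthens the unread suffix
theorem bSkip_length_le (rest : List Char) (i : Nat) :
    (bSkip rest i).1.length ≤ rest.length := by
  induction rest, i using bSkip.induct with
  | case1 i => simp [skip_nil]
  | case2 rest i => simp [skip_quote]
  | case3 i head rest' h ih => rw [skip_esc]; simp; omega
  | case4 i h => simp [skip_esc_nil]
  | case5 c rest i h1 h2 ih => rw [skip_other c rest i h1 h2]; simp; omega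

-- inside a string literal, A's scan lands exactly where B's inner while lands
theorem aLoop_string_phase (cs0 : List Char) (rest : List Char) (i : Nat) :
    ∀ (d st : Int) (acc : List (Int × Int × String)),
      aLoop cs0 rest i d true st acc =
        aLoop cs0 (bSkip rest i).1 (bSkip rest i).2 d false st acc := by
  induction rest, i using bSkip.induct with
  | case1 i => intro d st acc; simp [skip_nil, aLoop_nil]
  | case2 rest i => intro d st acc; rw [skip_quote, aLoop_true_quote]
  | case3 i head rest' h ih =>
    intro d st acc; rw [skip_esc, aLoop_true_esc]; exact ih d st acc
  | case4 i h => intro d st acc; rw [skip_esc_nil, aLoop_true_esc_nil, aLoop_nil]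
  | case5 c rest i h1 h2 ih =>
    intro d st acc
    rw [skip_other c rest i h1 h2, aLoop_true_other cs0 c rest i d st acc h1 h2]
    exact ih d st acc

-- out of a string literal, A's scan equals the fold gLoop over the brace events
theorem aLoop_eq_gLoop (cs0 : List Char) (fuel : Nat) :
    ∀ (rest : List Char) (i : Nat) (d st : Int) (acc : List (Int × Int × String)),
      rest.length ≤ fuel →
      aLoop cs0 rest i d false st acc = gLoop cs0 (bEvents fuel rest i) d st acc := by
  induction fuel with
  | zero =>
    intro rest i d st acc hle
    have : rest = [] := List.eq_nil_of_length_eq_zero (Nat.le_zero.mp hle)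
    subst this
    rw [aLoop_nil, ev_zero]; rfl
  | succ fuel ih =>
    intro rest i d st acc hle
    match rest with
    | [] => rw [aLoop_nil, ev_nil]; rfl
    | c :: rest' =>
      have hle' : rest'.length ≤ fuel := by simp at hle; omega
      by_cases hq : c = '"'
      · subst hq
        rw [aLoop_false_quote, ev_quote, aLoop_string_phase cs0 rest' (i + 1) d st acc]
        exact ih _ _ d st acc (le_trans (bSkip_length_le rest' (i + 1)) hle')
      · by_cases hob : c = '{'
        · subst hob
          rw [aLoop_false_open, ev_open, gLoop_open]
          exact ih _ _ _ _ acc hle'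
        · by_cases hcb : c = '}'
          · subst hcb
            rw [aLoop_false_close, ev_close, gLoop_close]
            by_cases hc : d - 1 = 0 ∧ st ≥ 0
            · rw [if_pos hc, if_pos hc, ih _ _ _ _ _ hle']
            · rw [if_neg hc, if_neg hc, ih _ _ _ _ _ hle']
          · rw [aLoop_false_other cs0 c rest' i d st acc hq hob hcb,
              ev_other fuel c rest' i hq hob hcb]
            exact ih _ _ _ _ _ hle'

-- the emit-on-close fold equals zipping the recorded opens (with the pending start, if any)
-- against the recorded closes
theorem gLoop_eq_zip (cs0 : List Char) :
    ∀ (evs : List (Nat × Int)) (d st : Int) (acc : List (Int × Int × String)),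
      (1 ≤ d → 0 ≤ st) →
      gLoop cs0 evs d st acc =
        acc ++ ((((if 1 ≤ d then [st.toNat] else []) ++ (bOC evs d).1).zip
          (bOC evs d).2).map (mkE cs0)) := by
  intro evs
  induction evs with
  | nil =>
    intro d st acc h
    simp [gLoop_nil, bOC_nil]
  | cons ev evs ih =>
    intro d st acc h
    obtain ⟨i, delta⟩ := ev
    by_cases hδ : delta = 1
    · subst hδ
      rw [gLoop_open, bOC_open]
      by_cases hd0 : d = 0
      · subst hd0
        rw [if_pos rfl, if_pos rfl]
        norm_num
        rw [ih 1 (i : Int) acc (fun _ => by positivity)]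
        norm_num
      · rw [if_neg hd0, if_neg hd0]
        by_cases hd1 : 1 ≤ d
        · have hst := h hd1
          rw [ih (d + 1) st acc (fun _ => hst)]
          simp only [if_pos hd1, if_pos (by omega : 1 ≤ d + 1)]
        · rw [ih (d + 1) st acc (by intro h1; omega)]
          simp only [if_neg hd1, if_neg (by omega : ¬ 1 ≤ d + 1)]
    · have hδ' : delta = -1 ∨ delta ≠ 1 := Or.inr hδ
      -- gLoop/bOC treat every non-1 delta as a close; specialise the step lemmas by hand
      have hg : gLoop cs0 ((i, delta) :: evs) d st acc =
          (if d - 1 = 0 ∧ st ≥ 0 then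
            gLoop cs0 evs (d - 1) (-1)
              (acc ++ [(st, (i : Int) + 1,
                String.ofList (PySem.List.slice cs0 (some st) (some ((i : Int) + 1))))])
          else gLoop cs0 evs (d - 1) st acc) := by
        rw [gLoop.eq_def]; simp [hδ]
      have hb : bOC ((i, delta) :: evs) d =
          ((bOC evs (d - 1)).1,
            (if d - 1 = 0 then i :: (bOC evs (d - 1)).2 else (bOC evs (d - 1)).2)) := by
        rw [bOC.eq_def]; simp [hδ]
      rw [hg, hb]
      by_cases hd1 : d = 1
      · subst hd1
        have hst : 0 ≤ st := h le_rfl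
        rw [if_pos ⟨by ring, hst⟩, if_pos (by omega : (1:Int) - 1 = 0)]
        norm_num
        rw [ih 0 (-1) _ (by intro h1; omega)]
        have hst' : ((st.toNat : Int)) = st := Int.toNat_of_nonneg hst
        simp [List.zip, mkE, hst', List.append_assoc]
      · rw [if_neg (by intro hc; exact hd1 (by omega)), if_neg (by omega : ¬ d - 1 = 0)]
        by_cases hd2 : 2 ≤ d
        · rw [ih (d - 1) st acc (fun _ => h (by omega))]
          simp only [if_pos (by omega : 1 ≤ d), if_pos (by omega : 1 ≤ d - 1)]
        · rw [ih (d - 1) st acc (by intro h1; omega)]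
          simp only [if_neg (by omega : ¬ 1 ≤ d), if_neg (by omega : ¬ 1 ≤ d - 1)]

-- bPhase2's append accumulators against the right-fold bOC
theorem bPhase2_eq_bOC :
    ∀ (evs : List (Nat × Int)) (d : Int) (opens closes : List Nat),
      bPhase2 evs d opens closes = (opens ++ (bOC evs d).1, closes ++ (bOC evs d).2) := by
  intro evs
  induction evs with
  | nil => intro d opens closes; simp [bPhase2_nil, bOC_nil]
  | cons ev evs ih =>
    intro d opens closes
    obtain ⟨i, delta⟩ := ev
    by_cases hδ : delta = 1
    · subst hδ
      rw [bPhase2_open, bOC_open, ih]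
      by_cases hd0 : d = 0 <;> simp [hd0]
    · have hp : bPhase2 ((i, delta) :: evs) d opens closes =
          bPhase2 evs (d - 1) opens (if d - 1 = 0 then closes ++ [i] else closes) := by
        rw [bPhase2.eq_def]; simp [hδ]
      have hb : bOC ((i, delta) :: evs) d =
          ((bOC evs (d - 1)).1,
            (if d - 1 = 0 then i :: (bOC evs (d - 1)).2 else (bOC evs (d - 1)).2)) := by
        rw [bOC.eq_def]; simp [hδ]
      rw [hp, hb, ih]
      by_cases hd0 : d - 1 = 0 <;> simp [hd0]

-- ===== VERDICT (by name: the statement is the Claim_ definition above) =====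
theorem split_array_entries_spec : Claim_equal_split_array_entries := by
  intro s _
  unfold Spec_split_array_entries split_array_entries split_array_entries_alt
  rw [aLoop_eq_gLoop s.toList s.toList.length s.toList 0 0 (-1) [] le_rfl]
  rw [gLoop_eq_zip s.toList _ 0 (-1) [] (by intro h; omega)]
  rw [bPhase2_eq_bOC]
  simp [mkE]
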